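-- pv_equiv track=rewrite | github.com/monstercleaning/gsc | scripts/phase2_e2_bundle_catalog.py | _classify_status_counts
-- ===== SOURCE A (Python) =====
-- from typing import Any, Dict, Iterable, List, Mapping, Optional, Sequence, Tuple
--
-- def _classify_status_counts(status_counts: Mapping[str, int]) -> Tuple[int, int, int, int]:
--     ok = 0
--     err = 0
--     skipped = 0
--     unknown = 0
--     for status, raw_count in sorted(((str(k), int(v)) for k, v in status_counts.items()), key=lambda kv: str(kv[0])):
--         count = int(raw_count)
--         if status == "ok":
--             ok += count
--         elif status == "error":
--             err += count
--         elif status.startswith("skipped"):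
--             skipped += count
--         else:
--             unknown += count
--     return ok, err, skipped, unknown
-- ===== SOURCE B (Python) =====
-- def _classify_status_counts(status_counts):
--     pairs = [(str(k), int(v)) for k, v in status_counts.items()]
--     ok = sum(c for s, c in pairs if s == "ok")
--     err = sum(c for s, c in pairs if s == "error")
--     skipped = sum(c for s, c in pairs if s.startswith("skipped"))
--     unknown = sum(c for s, c in pairs if s not in ("ok", "error") and not s.startswith("skipped"))
--     return ok, err, skipped, unknown
-- ===== Notes on version B (the rewrite author's own statement) =====
-- stated objective: simpler
-- what changed: Replaces the sort-then-single-branching-pass accumulation with four independent filtered sums over the unsorted pairs (the sort is irrelevant to the sums).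
import Mathlib
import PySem

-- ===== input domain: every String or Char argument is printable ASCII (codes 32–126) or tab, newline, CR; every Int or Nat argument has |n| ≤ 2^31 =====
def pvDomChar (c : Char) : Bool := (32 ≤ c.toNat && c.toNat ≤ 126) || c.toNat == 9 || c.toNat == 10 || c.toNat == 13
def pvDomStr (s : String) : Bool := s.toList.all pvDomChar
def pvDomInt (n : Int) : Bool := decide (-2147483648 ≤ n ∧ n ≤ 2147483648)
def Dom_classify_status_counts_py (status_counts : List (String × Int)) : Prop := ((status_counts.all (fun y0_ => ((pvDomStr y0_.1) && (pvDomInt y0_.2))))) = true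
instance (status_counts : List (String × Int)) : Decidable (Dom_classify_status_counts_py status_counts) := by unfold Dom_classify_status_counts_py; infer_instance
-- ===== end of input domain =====

-- B replaces A's sort-then-single-branching-pass with four independent filtered sums (the sort never affects the sums); objective: simpler.

-- ===== PORT A =====
-- loop body of A's for-loop
def pvStepA (acc : Int × Int × Int × Int) (kv : String × Int) : Int × Int × Int × Int :=
  let (ok, err, skipped, unknown) := acc
  let count := kv.2
  if kv.1 == "ok" then (ok + count, err, skipped, unknown)
  else if kv.1 == "error" then (ok, err + count, skipped, unknown)
  else if PySem.Str.startswith kv.1 "skipped" then (ok, err, skipped + count, unknown)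
  else (ok, err, skipped, unknown + count)

def classify_status_counts_py (status_counts : List (String × Int)) : Int × Int × Int × Int :=
  (PySem.List.sorted status_counts (fun kv => kv.1) false).foldl pvStepA (0, 0, 0, 0)

-- ===== PORT B =====
-- sum(c for s, c in pairs if p(s, c))
def pvFilteredSum (pairs : List (String × Int)) (p : String × Int → Bool) : Int :=
  ((pairs.filter p).map Prod.snd).sum

def classify_status_counts_py_alt (status_counts : List (String × Int)) : Int × Int × Int × Int :=
  let pairs := status_counts
  let ok := pvFilteredSum pairs (fun kv => kv.1 == "ok")
  let err := pvFilteredSum pairs (fun kv => kv.1 == "error")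
  let skipped := pvFilteredSum pairs (fun kv => PySem.Str.startswith kv.1 "skipped")
  let unknown := pvFilteredSum pairs (fun kv => !(kv.1 == "ok") && !(kv.1 == "error") && !(PySem.Str.startswith kv.1 "skipped"))
  (ok, err, skipped, unknown)

-- ===== PRECONDITION & SPEC =====
def Spec_classify_status_counts_py (status_counts : List (String × Int)) (out : Int × Int × Int × Int) : Prop := out = classify_status_counts_py_alt status_counts
instance (status_counts : List (String × Int)) (out : Int × Int × Int × Int) : Decidable (Spec_classify_status_counts_py status_counts out) := by unfold Spec_classify_status_counts_py; infer_instance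

-- ===== CLAIM =====
def Claim_equal_classify_status_counts_py : Prop := ∀ (status_counts : List (String × Int)), Dom_classify_status_counts_py status_counts → Spec_classify_status_counts_py status_counts (classify_status_counts_py status_counts)

-- ===== LEMMAS AND PROOFS =====
theorem pvFoldl_sums (l : List (String × Int)) :
    ∀ a b c d : Int,
      l.foldl pvStepA (a, b, c, d)
      = (a + pvFilteredSum l (fun kv => kv.1 == "ok"),
         b + pvFilteredSum l (fun kv => kv.1 == "error"),
         c + pvFilteredSum l (fun kv => PySem.Str.startswith kv.1 "skipped"),
         d + pvFilteredSum l (fun kv => !(kv.1 == "ok") && !(kv.1 == "error") && !(PySem.Str.startswith kv.1 "skipped"))) := by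
  induction l with
  | nil => intro a b c d; simp [pvFilteredSum]
  | cons hd tl ih =>
      intro a b c d
      rw [List.foldl_cons]
      by_cases h1 : hd.1 == "ok"
      · have e : hd.1 = "ok" := by simpa using h1
        rw [show pvStepA (a, b, c, d) hd = (a + hd.2, b, c, d) from by simp [pvStepA, h1], ih]
        simp [pvFilteredSum, e, PySem.Chars.startswith]
        omega
      · by_cases h2 : hd.1 == "error"
        · have e : hd.1 = "error" := by simpa using h2
          rw [show pvStepA (a, b, c, d) hd = (a, b + hd.2, c, d) from by simp [pvStepA, h1, h2], ih]
          simp [pvFilteredSum, e, PySem.Chars.startswith]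
          omega
        · have e1 : ¬ hd.1 = "ok" := by simpa using h1
          have e2 : ¬ hd.1 = "error" := by simpa using h2
          by_cases h3 : PySem.Str.startswith hd.1 "skipped"
          · have e3 : PySem.Chars.startswith hd.1.toList ['s', 'k', 'i', 'p', 'p', 'e', 'd'] = true := by
              simpa [PySem.Str.startswith] using h3
            rw [show pvStepA (a, b, c, d) hd = (a, b, c + hd.2, d) from by simp [pvStepA, h1, h2, e3], ih]
            simp [pvFilteredSum, e1, e2, e3]
            omega
          · have e3 : PySem.Chars.startswith hd.1.toList ['s', 'k', 'i', 'p', 'p', 'e', 'd'] = false := by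
              simpa [PySem.Str.startswith] using h3
            rw [show pvStepA (a, b, c, d) hd = (a, b, c, d + hd.2) from by simp [pvStepA, h1, h2, e3], ih]
            simp [pvFilteredSum, e1, e2, e3]
            omega

theorem pvFilteredSum_perm {l l' : List (String × Int)} (h : l.Perm l') (p : String × Int → Bool) :
    pvFilteredSum l p = pvFilteredSum l' p :=
  List.Perm.sum_eq (List.Perm.map Prod.snd (List.Perm.filter p h))

-- ===== VERDICT =====
theorem classify_status_counts_py_spec : Claim_equal_classify_status_counts_py := by
  intro sc _
  unfold Spec_classify_status_counts_py classify_status_counts_py classify_status_counts_py_alt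
  rw [pvFoldl_sums]
  have hp : (PySem.List.sorted sc (fun kv => kv.1) false).Perm sc := PySem.List.sorted_perm sc _ false
  simp [pvFilteredSum_perm hp]
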